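-- pv_equiv track=rewrite | github.com/choiyunh/WALK-A-DAY | Self/SKHynix/-1.py | solution
-- ===== SOURCE A (Python) =====
-- def solution(seat):
--     row, col = len(seat), len(seat[0])
--     answer = 0
--     direction = []
--     for i in range(row):
--         for j in range(col):
--             if seat[i][j] == 'M':
--                 direction = [(-2, 0), (-1, 0), (1, 0), (2, 0),
--                              (0, -2), (0, -1), (0, 1), (0, 2),
--                              (-1, -1), (-1, 1), (1, -1), (1, 1)]
--             elif seat[i][j] == 'N':
--                 direction = [(-3, 0), (-2, 0), (-1, 0), (1, 0), (2, 0), (3, 0),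
--                              (0, -3), (0, -2), (0, -1), (0, 1), (0, 2), (0, 3),
--                              (-2, -1), (-2, 1), (-1, -2), (-1, -1), (-1, 1), (-1, 2),
--                              (2, -1), (2, 1), (1, -2), (1, -1), (1, 1), (1, 2)]
--             if seat[i][j] in ['M', 'N']:
--                 for dx, dy in direction:
--                     if 0 <= i + dx < row and 0 <= j + dy < col:
--                         if seat[i + dx][j + dy] == 'C':
--                             answer += 1
--                             break
--     return answer
-- ===== SOURCE B (Python) =====
-- M_OFF = [(-2, 0), (-1, 0), (1, 0), (2, 0),
--          (0, -2), (0, -1), (0, 1), (0, 2),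
--          (-1, -1), (-1, 1), (1, -1), (1, 1)]
-- N_OFF = [(-3, 0), (-2, 0), (-1, 0), (1, 0), (2, 0), (3, 0),
--          (0, -3), (0, -2), (0, -1), (0, 1), (0, 2), (0, 3),
--          (-2, -1), (-2, 1), (-1, -2), (-1, -1), (-1, 1), (-1, 2),
--          (2, -1), (2, 1), (1, -2), (1, -1), (1, 1), (1, 2)]
--
--
-- def solution(seat):
--     row, col = len(seat), len(seat[0])
--     counted = set()
--     for i in range(row):
--         for j in range(col):
--             if seat[i][j] == 'C':
--                 for dx, dy in M_OFF:
--                     x, y = i + dx, j + dy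
--                     if 0 <= x < row and 0 <= y < col and seat[x][y] == 'M':
--                         counted.add((x, y))
--                 for dx, dy in N_OFF:
--                     x, y = i + dx, j + dy
--                     if 0 <= x < row and 0 <= y < col and seat[x][y] == 'N':
--                         counted.add((x, y))
--     return len(counted)
-- ===== Notes on version B (the rewrite author's own statement) =====
-- stated objective: alternative
-- what changed: Inverted traversal: instead of scanning every M/N cell and breaking on the first C neighbour, B loops over C cells, inserts every in-bounds M (via the M-offsets) and N (via the N-offsets) coordinate into a set, and returns the set's size; correctness relies on the offset lists being symmetric under negation.
import Mathlib
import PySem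

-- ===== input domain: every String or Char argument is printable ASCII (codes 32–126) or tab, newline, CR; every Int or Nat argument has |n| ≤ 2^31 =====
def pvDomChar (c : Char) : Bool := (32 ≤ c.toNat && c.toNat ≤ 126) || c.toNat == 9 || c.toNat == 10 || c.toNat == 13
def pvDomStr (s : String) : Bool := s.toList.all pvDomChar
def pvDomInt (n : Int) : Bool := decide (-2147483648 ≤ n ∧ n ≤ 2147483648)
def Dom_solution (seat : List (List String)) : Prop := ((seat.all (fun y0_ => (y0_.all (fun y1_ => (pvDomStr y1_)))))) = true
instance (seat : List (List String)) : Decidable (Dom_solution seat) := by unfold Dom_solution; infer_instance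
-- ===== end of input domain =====

-- B inverts A's traversal: it walks over the 'C' cells and collects the adjacent 'M'/'N'
-- coordinates in a set (objective: alternative decomposition, same asymptotic cost).

-- ===== PORT A =====
-- the two offset lists A assigns to `direction`
def mOff : List (Int × Int) :=
  [(-2, 0), (-1, 0), (1, 0), (2, 0),
   (0, -2), (0, -1), (0, 1), (0, 2),
   (-1, -1), (-1, 1), (1, -1), (1, 1)]

def nOff : List (Int × Int) :=
  [(-3, 0), (-2, 0), (-1, 0), (1, 0), (2, 0), (3, 0),
   (0, -3), (0, -2), (0, -1), (0, 1), (0, 2), (0, 3),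
   (-2, -1), (-2, 1), (-1, -2), (-1, -1), (-1, 1), (-1, 2),
   (2, -1), (2, 1), (1, -2), (1, -1), (1, 1), (1, 2)]

-- seat[i][j]; under Pre_ every access is in range, so the defaults never fire
def cellAt (seat : List (List String)) (i j : Int) : String :=
  PySem.List.pyGetD (PySem.List.pyGetD seat i []) j ""

-- A's inner `for dx, dy in direction: … break` loop: did any offset hit an in-bounds 'C'?
def scanBreak (seat : List (List String)) (row col i j : Int) : List (Int × Int) → Bool
  | [] => false
  | d :: rest =>
    if 0 ≤ i + d.1 ∧ i + d.1 < row ∧ 0 ≤ j + d.2 ∧ j + d.2 < col then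
      if cellAt seat (i + d.1) (j + d.2) = "C" then true
      else scanBreak seat row col i j rest
    else scanBreak seat row col i j rest

def solution (seat : List (List String)) : Int :=
  let row : Int := seat.length
  let col : Int := (PySem.List.pyGetD seat 0 []).length
  let res :=
    (PySem.List.pyRange 0 row 1).foldl (fun st i =>
      (PySem.List.pyRange 0 col 1).foldl (fun (st : Int × List (Int × Int)) j =>
        let dir := if cellAt seat i j = "M" then mOff
                   else if cellAt seat i j = "N" then nOff
                   else st.2
        let ans := if cellAt seat i j = "M" ∨ cellAt seat i j = "N" then
                     (if scanBreak seat row col i j dir then st.1 + 1 else st.1)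
                   else st.1
        (ans, dir)) st) ((0 : Int), ([] : List (Int × Int)))
  res.1

-- ===== PORT B =====
-- B's `for dx, dy in offs: … counted.add((x, y))` loop (written once, used for both offset lists)
def addNbrs (seat : List (List String)) (row col i j : Int) (target : String)
    (offs : List (Int × Int)) (s : PySem.Set (Int × Int)) : PySem.Set (Int × Int) :=
  offs.foldl (fun s d =>
    if 0 ≤ i + d.1 ∧ i + d.1 < row ∧ 0 ≤ j + d.2 ∧ j + d.2 < col ∧
        cellAt seat (i + d.1) (j + d.2) = target then
      PySem.Set.add s (i + d.1, j + d.2)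
    else s) s

def solution_alt (seat : List (List String)) : Int :=
  let row : Int := seat.length
  let col : Int := (PySem.List.pyGetD seat 0 []).length
  let counted :=
    (PySem.List.pyRange 0 row 1).foldl (fun s i =>
      (PySem.List.pyRange 0 col 1).foldl (fun (s : PySem.Set (Int × Int)) j =>
        if cellAt seat i j = "C" then
          addNbrs seat row col i j "N" nOff (addNbrs seat row col i j "M" mOff s)
        else s) s) (PySem.Set.empty)
  (counted.length : Int)

-- ===== PRECONDITION & SPEC =====
-- Pre_ is exactly where Python A returns: a nonempty grid whose rows all have at least
-- the first row's length (otherwise `seat[0]` or some `seat[i][j]`, j < col, raises IndexError).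
def Pre_solution (seat : List (List String)) : Prop :=
  seat ≠ [] ∧ ∀ r ∈ seat, seat.headI.length ≤ r.length
instance (seat : List (List String)) : Decidable (Pre_solution seat) := by
  unfold Pre_solution; infer_instance

def pvWitness_solution : List (List String) := [["C", "M"], ["N", "."]]

def Spec_solution (seat : List (List String)) (out : Int) : Prop := out = solution_alt seat
instance (seat : List (List String)) (out : Int) : Decidable (Spec_solution seat out) := by
  unfold Spec_solution; infer_instance

-- ===== CLAIM (what is proved, stated in full; the proofs are below) =====
def Claim_equal_solution : Prop := ∀ (seat : List (List String)), Dom_solution seat → Pre_solution seat → Spec_solution seat (solution seat)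

-- ===== LEMMAS AND PROOFS =====

-- the bound check of both programs, as one predicate
def inbP (row col x y : Int) : Prop := 0 ≤ x ∧ x < row ∧ 0 ≤ y ∧ y < col

-- per-cell verdict of A: is this an M/N cell with an in-bounds 'C' in its neighbourhood?
def Pb (seat : List (List String)) (row col i j : Int) : Bool :=
  if cellAt seat i j = "M" then scanBreak seat row col i j mOff
  else if cellAt seat i j = "N" then scanBreak seat row col i j nOff
  else false

theorem scanBreak_iff (seat : List (List String)) (row col i j : Int) (L : List (Int × Int)) :
    scanBreak seat row col i j L = true ↔
      ∃ d ∈ L, inbP row col (i + d.1) (j + d.2) ∧ cellAt seat (i + d.1) (j + d.2) = "C" := by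
  induction L with
  | nil => simp [scanBreak]
  | cons d rest ih =>
    simp only [scanBreak, inbP]
    split_ifs with h1 h2
    · simp_all
    · simp only [ih, inbP]; aesop
    · simp only [ih, inbP]; aesop

theorem A_inner (seat : List (List String)) (row col i : Int) (L : List Int)
    (st : Int × List (Int × Int)) :
    ((L.foldl (fun (st : Int × List (Int × Int)) j =>
        (if cellAt seat i j = "M" ∨ cellAt seat i j = "N" then
           (if scanBreak seat row col i j
                (if cellAt seat i j = "M" then mOff
                 else if cellAt seat i j = "N" then nOff else st.2) then st.1 + 1 else st.1)
         else st.1,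
         if cellAt seat i j = "M" then mOff
         else if cellAt seat i j = "N" then nOff else st.2)) st).1)
      = st.1 + (L.countP (fun j => Pb seat row col i j) : Int) := by
  induction L generalizing st with
  | nil => simp
  | cons j rest ih =>
    rw [List.foldl_cons, ih, List.countP_cons]
    simp only [Pb]
    split_ifs <;> push_cast <;> simp_all <;> omega

theorem A_eq_count (seat : List (List String)) (row col : Int) :
    ((PySem.List.pyRange 0 row 1).foldl (fun st i =>
      (PySem.List.pyRange 0 col 1).foldl (fun (st : Int × List (Int × Int)) j =>
        (if cellAt seat i j = "M" ∨ cellAt seat i j = "N" then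
           (if scanBreak seat row col i j
                (if cellAt seat i j = "M" then mOff
                 else if cellAt seat i j = "N" then nOff else st.2) then st.1 + 1 else st.1)
         else st.1,
         if cellAt seat i j = "M" then mOff
         else if cellAt seat i j = "N" then nOff else st.2)) st) ((0 : Int), ([] : List (Int × Int)))).1
      = (((PySem.List.pyRange 0 row 1).map
            (fun i => (PySem.List.pyRange 0 col 1).countP (fun j => Pb seat row col i j))).sum : Int) := by
  suffices h : ∀ (L : List Int) (st : Int × List (Int × Int)),
      ((L.foldl (fun st i =>
        (PySem.List.pyRange 0 col 1).foldl (fun (st : Int × List (Int × Int)) j =>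
          (if cellAt seat i j = "M" ∨ cellAt seat i j = "N" then
             (if scanBreak seat row col i j
                  (if cellAt seat i j = "M" then mOff
                   else if cellAt seat i j = "N" then nOff else st.2) then st.1 + 1 else st.1)
           else st.1,
           if cellAt seat i j = "M" then mOff
           else if cellAt seat i j = "N" then nOff else st.2)) st) st).1)
        = st.1 + ((L.map (fun i => (PySem.List.pyRange 0 col 1).countP (fun j => Pb seat row col i j))).sum : Int) by
    rw [h]; push_cast; ring
  intro L
  induction L with
  | nil => intro st; simp
  | cons i rest ih =>
    intro st
    rw [List.foldl_cons, ih, A_inner]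
    simp only [List.map_cons, List.sum_cons]
    push_cast
    ring

-- "p was inserted from C-cell (i,j) through offset list offs while checking for target"
def Hit (seat : List (List String)) (row col i j : Int) (target : String)
    (offs : List (Int × Int)) (p : Int × Int) : Prop :=
  ∃ d ∈ offs, inbP row col (i + d.1) (j + d.2) ∧
    cellAt seat (i + d.1) (j + d.2) = target ∧ p = (i + d.1, j + d.2)

theorem mem_addNbrs (seat : List (List String)) (row col i j : Int) (target : String)
    (offs : List (Int × Int)) (s : PySem.Set (Int × Int)) (p : Int × Int) :
    p ∈ addNbrs seat row col i j target offs s ↔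
      p ∈ s ∨ Hit seat row col i j target offs p := by
  induction offs generalizing s with
  | nil => simp [addNbrs, Hit]
  | cons d rest ih =>
    simp only [addNbrs, List.foldl_cons] at *
    rw [ih]
    simp only [Hit, inbP, List.mem_cons]
    split_ifs with h
    · rw [PySem.Set.mem_add]
      aesop
    · aesop

theorem nodup_addNbrs (seat : List (List String)) (row col i j : Int) (target : String)
    (offs : List (Int × Int)) (s : PySem.Set (Int × Int)) (hs : s.Nodup) :
    (addNbrs seat row col i j target offs s).Nodup := by
  induction offs generalizing s with
  | nil => simpa [addNbrs]
  | cons d rest ih =>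
    simp only [addNbrs, List.foldl_cons] at *
    split_ifs with h
    · exact ih _ (PySem.Set.nodup_add _ _ hs)
    · exact ih _ hs

-- "p is an M/N seat that B's set receives from some C-cell"
def Q (seat : List (List String)) (row col : Int) (p : Int × Int) : Prop :=
  ∃ i, (0 ≤ i ∧ i < row) ∧ ∃ j, (0 ≤ j ∧ j < col) ∧ cellAt seat i j = "C" ∧
    (Hit seat row col i j "M" mOff p ∨ Hit seat row col i j "N" nOff p)

theorem mem_B_inner (seat : List (List String)) (row col i : Int) (L : List Int)
    (s : PySem.Set (Int × Int)) (p : Int × Int) :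
    p ∈ L.foldl (fun (s : PySem.Set (Int × Int)) j =>
        if cellAt seat i j = "C" then
          addNbrs seat row col i j "N" nOff (addNbrs seat row col i j "M" mOff s)
        else s) s ↔
      p ∈ s ∨ ∃ j ∈ L, cellAt seat i j = "C" ∧
        (Hit seat row col i j "M" mOff p ∨ Hit seat row col i j "N" nOff p) := by
  induction L generalizing s with
  | nil => simp
  | cons j rest ih =>
    rw [List.foldl_cons, ih]
    split_ifs with h
    · rw [mem_addNbrs, mem_addNbrs]
      aesop
    · aesop

theorem nodup_B_inner (seat : List (List String)) (row col i : Int) (L : List Int)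
    (s : PySem.Set (Int × Int)) (hs : s.Nodup) :
    (L.foldl (fun (s : PySem.Set (Int × Int)) j =>
        if cellAt seat i j = "C" then
          addNbrs seat row col i j "N" nOff (addNbrs seat row col i j "M" mOff s)
        else s) s).Nodup := by
  induction L generalizing s with
  | nil => simpa
  | cons j rest ih =>
    rw [List.foldl_cons]
    split_ifs with h
    · exact ih _ (nodup_addNbrs _ _ _ _ _ _ _ _ (nodup_addNbrs _ _ _ _ _ _ _ _ hs))
    · exact ih _ hs

theorem mem_B_outer (seat : List (List String)) (row col : Int) (R : List Int)
    (s : PySem.Set (Int × Int)) (p : Int × Int) :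
    p ∈ R.foldl (fun s i =>
        (PySem.List.pyRange 0 col 1).foldl (fun (s : PySem.Set (Int × Int)) j =>
          if cellAt seat i j = "C" then
            addNbrs seat row col i j "N" nOff (addNbrs seat row col i j "M" mOff s)
          else s) s) s ↔
      p ∈ s ∨ ∃ i ∈ R, ∃ j ∈ PySem.List.pyRange 0 col 1, cellAt seat i j = "C" ∧
        (Hit seat row col i j "M" mOff p ∨ Hit seat row col i j "N" nOff p) := by
  induction R generalizing s with
  | nil => simp
  | cons i rest ih =>
    rw [List.foldl_cons, ih, mem_B_inner]
    aesop

theorem nodup_B_outer (seat : List (List String)) (row col : Int) (R : List Int)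
    (s : PySem.Set (Int × Int)) (hs : s.Nodup) :
    (R.foldl (fun s i =>
        (PySem.List.pyRange 0 col 1).foldl (fun (s : PySem.Set (Int × Int)) j =>
          if cellAt seat i j = "C" then
            addNbrs seat row col i j "N" nOff (addNbrs seat row col i j "M" mOff s)
          else s) s) s).Nodup := by
  induction R generalizing s with
  | nil => simpa
  | cons i rest ih =>
    rw [List.foldl_cons]
    exact ih _ (nodup_B_inner _ _ _ _ _ _ hs)

-- both offset lists are closed under negation
theorem mOff_neg : ∀ d ∈ mOff, (-d.1, -d.2) ∈ mOff := by decide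
theorem nOff_neg : ∀ d ∈ nOff, (-d.1, -d.2) ∈ nOff := by decide

-- the pivot: p enters B's set from some C-cell iff p is an in-bounds cell A counts
theorem Q_iff (seat : List (List String)) (row col : Int) (p : Int × Int) :
    Q seat row col p ↔
      (0 ≤ p.1 ∧ p.1 < row ∧ 0 ≤ p.2 ∧ p.2 < col ∧ Pb seat row col p.1 p.2 = true) := by
  constructor
  · rintro ⟨i, ⟨hi0, hi1⟩, j, ⟨hj0, hj1⟩, hC, hcase⟩
    have key : ∀ (offs : List (Int × Int)) (target : String),
        (∀ d ∈ offs, (-d.1, -d.2) ∈ offs) →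
        Hit seat row col i j target offs p →
        0 ≤ p.1 ∧ p.1 < row ∧ 0 ≤ p.2 ∧ p.2 < col ∧
          cellAt seat p.1 p.2 = target ∧ scanBreak seat row col p.1 p.2 offs = true := by
      rintro offs target hneg ⟨d, hd, ⟨h1, h2, h3, h4⟩, ht, hp⟩
      subst hp
      refine ⟨h1, h2, h3, h4, ht, ?_⟩
      rw [scanBreak_iff]
      refine ⟨(-d.1, -d.2), hneg d hd, ?_⟩
      have e1 : i + d.1 + (-d.1, -d.2).1 = i := by simp
      have e2 : j + d.2 + (-d.1, -d.2).2 = j := by simp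
      rw [e1, e2]
      exact ⟨⟨hi0, hi1, hj0, hj1⟩, hC⟩
    rcases hcase with hm | hn
    · obtain ⟨h1, h2, h3, h4, ht, hs⟩ := key mOff "M" mOff_neg hm
      exact ⟨h1, h2, h3, h4, by simp [Pb, ht, hs]⟩
    · obtain ⟨h1, h2, h3, h4, ht, hs⟩ := key nOff "N" nOff_neg hn
      exact ⟨h1, h2, h3, h4, by simp [Pb, ht, hs]⟩
  · rintro ⟨h1, h2, h3, h4, hPb⟩
    have key : ∀ (offs : List (Int × Int)) (target : String),
        (∀ d ∈ offs, (-d.1, -d.2) ∈ offs) →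
        cellAt seat p.1 p.2 = target →
        scanBreak seat row col p.1 p.2 offs = true →
        ∃ i, (0 ≤ i ∧ i < row) ∧ ∃ j, (0 ≤ j ∧ j < col) ∧ cellAt seat i j = "C" ∧
          Hit seat row col i j target offs p := by
      intro offs target hneg ht hs
      rw [scanBreak_iff] at hs
      obtain ⟨d, hd, ⟨g1, g2, g3, g4⟩, hC⟩ := hs
      refine ⟨p.1 + d.1, ⟨g1, g2⟩, p.2 + d.2, ⟨g3, g4⟩, hC,
        ⟨(-d.1, -d.2), hneg d hd, ?_, ?_, ?_⟩⟩
      · constructor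
        · simpa using h1
        · refine ⟨by simpa using h2, by simpa using h3, by simpa using h4⟩
      · have e1 : p.1 + d.1 + (-d.1, -d.2).1 = p.1 := by simp
        have e2 : p.2 + d.2 + (-d.1, -d.2).2 = p.2 := by simp
        rw [e1, e2, ht]
      · apply Prod.ext <;> simp
    simp only [Pb] at hPb
    split_ifs at hPb with hM hN
    · obtain ⟨i, hi, j, hj, hC, hh⟩ := key mOff "M" mOff_neg hM hPb
      exact ⟨i, hi, j, hj, hC, Or.inl hh⟩
    · obtain ⟨i, hi, j, hj, hC, hh⟩ := key nOff "N" nOff_neg hN hPb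
      exact ⟨i, hi, j, hj, hC, Or.inr hh⟩

theorem countP_product (C : List Int) (q : Int × Int → Bool) (R : List Int) :
    (R ×ˢ C).countP q = (R.map (fun i => C.countP (fun j => q (i, j)))).sum := by
  induction R with
  | nil => simp
  | cons a rest ih =>
    rw [List.product_cons, List.countP_append, ih]
    simp [List.countP_map, Function.comp_def]

-- List.pair_mem_product, restated through the ×ˢ notation so simp can match it
theorem pair_mem_sprod (l1 l2 : List Int) (a b : Int) :
    ((a, b) ∈ l1 ×ˢ l2) ↔ a ∈ l1 ∧ b ∈ l2 := List.pair_mem_product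

theorem B_eq_count (seat : List (List String)) (row col : Int) :
    (((PySem.List.pyRange 0 row 1).foldl (fun s i =>
        (PySem.List.pyRange 0 col 1).foldl (fun (s : PySem.Set (Int × Int)) j =>
          if cellAt seat i j = "C" then
            addNbrs seat row col i j "N" nOff (addNbrs seat row col i j "M" mOff s)
          else s) s) (PySem.Set.empty : PySem.Set (Int × Int))).length : Int)
      = (((PySem.List.pyRange 0 row 1).map
            (fun i => (PySem.List.pyRange 0 col 1).countP (fun j => Pb seat row col i j))).sum : Int) := by
  have hperm :
      ((PySem.List.pyRange 0 row 1).foldl (fun s i =>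
        (PySem.List.pyRange 0 col 1).foldl (fun (s : PySem.Set (Int × Int)) j =>
          if cellAt seat i j = "C" then
            addNbrs seat row col i j "N" nOff (addNbrs seat row col i j "M" mOff s)
          else s) s) (PySem.Set.empty : PySem.Set (Int × Int))).Perm
      (((PySem.List.pyRange 0 row 1) ×ˢ (PySem.List.pyRange 0 col 1)).filter
        (fun p => Pb seat row col p.1 p.2)) := by
    rw [List.perm_ext_iff_of_nodup]
    · intro p
      obtain ⟨p1, p2⟩ := p
      rw [mem_B_outer]
      have hq : ((p1, p2) ∈ (PySem.Set.empty : PySem.Set (Int × Int)) ∨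
          ∃ i ∈ PySem.List.pyRange 0 row 1, ∃ j ∈ PySem.List.pyRange 0 col 1,
            cellAt seat i j = "C" ∧
            (Hit seat row col i j "M" mOff (p1, p2) ∨ Hit seat row col i j "N" nOff (p1, p2)))
          ↔ Q seat row col (p1, p2) := by
        simp only [PySem.Set.empty, List.not_mem_nil, false_or, Q,
          PySem.List.mem_pyRange_one]
      rw [hq, Q_iff, List.mem_filter]
      simp only [pair_mem_sprod, PySem.List.mem_pyRange_one]
      tauto
    · exact nodup_B_outer _ _ _ _ _ List.nodup_nil
    · exact (List.Nodup.product (PySem.List.nodup_pyRange_one _ _)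
        (PySem.List.nodup_pyRange_one _ _)).filter _
  rw [hperm.length_eq, ← List.countP_eq_length_filter, countP_product]

theorem final_eq (seat : List (List String)) : solution seat = solution_alt seat := by
  simp only [solution, solution_alt]
  rw [A_eq_count, B_eq_count]

-- ===== VERDICT (by name: the statement is the Claim_ definition above) =====
theorem solution_spec : Claim_equal_solution := by
  intro seat _ _
  unfold Spec_solution
  exact final_eq seat
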